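-- pv_equiv track=rewrite | github.com/ipriyam26/LeetCode | valid.py | bfs
-- ===== SOURCE A (Python) =====
-- from collections import defaultdict, deque
--
-- def bfs(u, graph, d_thr):
--     visited = set()
--     queue = deque([(u, 0)])
--     max_dist = 0
--
--     while queue:
--         node, dist = queue.popleft()
--
--         if node not in visited:
--             visited.add(node)
--             max_dist = max(max_dist, dist)
--             if dist < d_thr:
--                 for neighbor in graph[node]:
--                     queue.append((neighbor, dist + 1))
--
--     return visited, max_dist
-- ===== SOURCE B (Python) =====
-- def bfs(u, graph, d_thr):
--     visited = set()
--     frontier = [u]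
--     level = 0
--     max_dist = 0
--
--     while frontier:
--         next_frontier = []
--         for node in frontier:
--             if node not in visited:
--                 visited.add(node)
--                 max_dist = max(max_dist, level)
--                 if level < d_thr:
--                     for neighbor in graph[node]:
--                         next_frontier.append(neighbor)
--         frontier = next_frontier
--         level += 1
--
--     return visited, max_dist
-- ===== Notes on version B (the rewrite author's own statement) =====
-- stated objective: alternative
-- what changed: Replaces the deque of (node, dist) pairs popped one at a time by a level-synchronous BFS: a nested loop that sweeps the current frontier list, builds the next frontier, and tracks one integer level counter instead of per-node distance tags.
-- outside the precondition, e.g. on bfs(0, {0: [], 1: [5]}, 2): A returns ({0}, 0), B returns ({0}, 0)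
import Mathlib
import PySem

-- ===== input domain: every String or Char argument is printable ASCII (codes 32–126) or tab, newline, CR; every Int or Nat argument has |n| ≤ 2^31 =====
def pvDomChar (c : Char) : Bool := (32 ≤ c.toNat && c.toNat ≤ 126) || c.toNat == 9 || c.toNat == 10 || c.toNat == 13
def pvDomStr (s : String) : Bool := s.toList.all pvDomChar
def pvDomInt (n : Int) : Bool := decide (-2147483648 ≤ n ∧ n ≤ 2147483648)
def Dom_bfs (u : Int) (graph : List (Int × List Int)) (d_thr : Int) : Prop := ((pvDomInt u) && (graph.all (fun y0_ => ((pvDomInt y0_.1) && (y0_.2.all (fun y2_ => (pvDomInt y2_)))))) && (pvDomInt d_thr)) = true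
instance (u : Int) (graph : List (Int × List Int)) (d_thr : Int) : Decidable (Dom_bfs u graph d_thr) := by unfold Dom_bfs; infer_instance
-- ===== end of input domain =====

-- B replaces the deque-based node-at-a-time BFS by a level-synchronous BFS (nested frontier
-- sweep with an integer level counter); alternative decomposition, same asymptotic cost.


-- ===== PORT A =====
-- Set facts specific to these loops' visited-set bookkeeping
theorem pvContains_add (vis : PySem.Set Int) (x y : Int) :
    PySem.Set.contains (PySem.Set.add vis x) y = (PySem.Set.contains vis y || y == x) := by
  simp only [PySem.Set.add, PySem.Set.contains]
  split
  · next h =>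
    cases hy : List.contains vis y <;> cases hxy : (y == x) <;>
      simp_all [List.contains_iff_mem]
  · cases hxy : (y == x) <;> simp_all

-- termination measure shared by both loops: total neighbour-list length of not-yet-visited keys
def pvUnvis (graph : List (Int × List Int)) (vis : PySem.Set Int) : Nat :=
  ((graph.filter (fun p => !(PySem.Set.contains vis p.1))).map (fun p => p.2.length)).sum

theorem pvUnvis_mono (graph : List (Int × List Int)) (vis : PySem.Set Int) (x : Int) :
    pvUnvis graph (PySem.Set.add vis x) ≤ pvUnvis graph vis := by
  induction graph with
  | nil => simp [pvUnvis]
  | cons p rest ih =>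
    simp only [pvUnvis, List.filter_cons, pvContains_add] at *
    cases h : PySem.Set.contains vis p.1 <;> cases hx : (p.1 == x) <;>
      simp only [h, hx, Bool.or_false, Bool.false_or, Bool.or_true, Bool.true_or, Bool.not_false, Bool.not_true, Bool.false_eq_true, eq_self_iff_true, if_true, if_false, List.map_cons, List.sum_cons] <;> omega

theorem pvUnvis_add (graph : List (Int × List Int)) (vis : PySem.Set Int) (node : Int)
    (hnode : PySem.Set.contains vis node = false) (ns : List Int)
    (hget : (PySem.Dict.mk graph).get? node = some ns) :
    pvUnvis graph (PySem.Set.add vis node) + ns.length ≤ pvUnvis graph vis := by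
  induction graph with
  | nil => simp [PySem.Dict.get?] at hget
  | cons p rest ih =>
    rw [PySem.Dict.get?_mk_cons] at hget
    simp only [pvUnvis, List.filter_cons, pvContains_add] at *
    by_cases hk : (p.1 == node) = true
    · simp only [hk, if_true] at hget
      cases hget
      have hv : PySem.Set.contains vis p.1 = false := by
        have : p.1 = node := by simpa using hk
        simpa [this] using hnode
      have hmono := pvUnvis_mono rest vis node
      simp only [pvUnvis, pvContains_add] at hmono
      simp only [hv, hk, Bool.or_false, Bool.false_or, Bool.or_true, Bool.true_or, Bool.not_false, Bool.not_true, Bool.false_eq_true, eq_self_iff_true, if_true, if_false, List.map_cons, List.sum_cons]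
      omega
    · simp only [hk, if_false] at hget
      have ihr := ih hget
      have hk' : (p.1 == node) = false := by simpa using hk
      cases h : PySem.Set.contains vis p.1 <;>
        simp only [h, hk', Bool.or_false, Bool.false_or, Bool.or_true, Bool.true_or, Bool.not_false, Bool.not_true, Bool.false_eq_true, eq_self_iff_true, if_true, if_false, List.map_cons, List.sum_cons] <;> omega

-- A's while-loop: FIFO queue of (node, dist) pairs
def bfsLoopA (graph : List (Int × List Int)) (d_thr : Int) (vis : PySem.Set Int)
    (queue : List (Int × Int)) (md : Int) : List Int × Int :=
  match queue with
  | [] => (vis, md)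
  | (node, dist) :: q =>
    if hv : PySem.Set.contains vis node = true then
      bfsLoopA graph d_thr vis q md
    else
      let vis' := PySem.Set.add vis node
      let md' := max md dist
      if dist < d_thr then
        match hg : (PySem.Dict.mk graph).get? node with
        | some ns => bfsLoopA graph d_thr vis' (q ++ ns.map (fun v => (v, dist + 1))) md'
        | none => (vis', md')   -- Python raises KeyError here; excluded by Pre_bfs
      else
        bfsLoopA graph d_thr vis' q md'
termination_by pvUnvis graph vis * 3 + queue.length
decreasing_by
  · simp only [List.length_cons]; omega
  · have h1 := pvUnvis_add graph vis node (by simpa using hv) ns hg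
    simp only [List.length_append, List.length_map, List.length_cons]
    omega
  · have h1 := pvUnvis_mono graph vis node
    simp only [List.length_cons]
    omega

def bfs (u : Int) (graph : List (Int × List Int)) (d_thr : Int) : List Int × Int :=
  bfsLoopA graph d_thr PySem.Set.empty [(u, 0)] 0

-- ===== PORT B =====
-- inner 'for node in frontier' sweep; .inl = the state at a KeyError point (excluded by Pre_bfs)
def bfsInnerB (graph : List (Int × List Int)) (d_thr : Int) (level : Int) :
    List Int → PySem.Set Int → List Int → Int →
    (List Int × Int) ⊕ (PySem.Set Int × List Int × Int)
  | [], vis, next, md => .inr (vis, next, md)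
  | node :: rest, vis, next, md =>
    if PySem.Set.contains vis node = true then
      bfsInnerB graph d_thr level rest vis next md
    else
      let vis' := PySem.Set.add vis node
      let md' := max md level
      if level < d_thr then
        match (PySem.Dict.mk graph).get? node with
        | some ns => bfsInnerB graph d_thr level rest vis' (next ++ ns) md'
        | none => .inl (vis', md')   -- Python raises KeyError here; excluded by Pre_bfs
      else
        bfsInnerB graph d_thr level rest vis' next md'

theorem bfsInnerB_measure (graph : List (Int × List Int)) (d_thr level : Int) :
    ∀ (f : List Int) (vis : PySem.Set Int) (next : List Int) (md : Int)
      (vis' : PySem.Set Int) (next' : List Int) (md' : Int),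
      bfsInnerB graph d_thr level f vis next md = .inr (vis', next', md') →
      pvUnvis graph vis' * 3 + next'.length ≤ pvUnvis graph vis * 3 + next.length := by
  intro f
  induction f with
  | nil => intro vis next md vis' next' md' h; cases h; omega
  | cons node rest ih =>
    intro vis next md vis' next' md' h
    simp only [bfsInnerB] at h
    by_cases hv : PySem.Set.contains vis node = true
    · simp only [hv, if_true] at h
      exact ih _ _ _ _ _ _ h
    · simp only [hv, if_false] at h
      by_cases hl : level < d_thr
      · simp only [hl, if_true] at h
        cases hg : (PySem.Dict.mk graph).get? node with
        | some ns =>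
          rw [hg] at h
          have h1 := ih _ _ _ _ _ _ h
          have h2 := pvUnvis_add graph vis node (by simpa using hv) ns hg
          simp only [List.length_append] at h1
          omega
        | none => rw [hg] at h; cases h
      · simp only [hl, if_false] at h
        have h1 := ih _ _ _ _ _ _ h
        have h2 := pvUnvis_mono graph vis node
        omega

-- outer 'while frontier' loop
def bfsOuterB (graph : List (Int × List Int)) (d_thr : Int) (frontier : List Int)
    (vis : PySem.Set Int) (level : Int) (md : Int) : List Int × Int :=
  match hf : frontier with
  | [] => (vis, md)
  | _ :: _ =>
    match hs : bfsInnerB graph d_thr level frontier vis [] md with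
    | .inl r => r
    | .inr (vis', next, md') => bfsOuterB graph d_thr next vis' (level + 1) md'
termination_by pvUnvis graph vis * 3 + frontier.length
decreasing_by
  have h1 := bfsInnerB_measure graph d_thr level frontier vis [] md vis' next md' (by rw [hf] at hs ⊢; exact hs)
  simp only [List.length_nil] at h1
  subst hf
  simp only [List.length_cons]
  omega

def bfs_alt (u : Int) (graph : List (Int × List Int)) (d_thr : Int) : List Int × Int :=
  bfsOuterB graph d_thr [u] PySem.Set.empty 0 0

-- ===== PRECONDITION & SPEC =====
-- Pre_bfs excludes inputs where Python's graph[node] raises KeyError (a reached node with no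
-- key); it is stated closed-form (u and every listed neighbour are keys, or d_thr ≤ 0 so no
-- lookup happens), which is slightly narrower than "every node reached within d_thr is a key":
-- it also excludes some graphs whose only missing neighbours are unreachable, on which A returns.
def Pre_bfs (u : Int) (graph : List (Int × List Int)) (d_thr : Int) : Prop :=
  d_thr ≤ 0 ∨ (u ∈ graph.map (·.1) ∧ ∀ p ∈ graph, ∀ v ∈ p.2, v ∈ graph.map (·.1))
instance (u : Int) (graph : List (Int × List Int)) (d_thr : Int) : Decidable (Pre_bfs u graph d_thr) := by unfold Pre_bfs; infer_instance

def pvWitness_bfs : Int × (List (Int × List Int)) × Int := (0, [(0, [1, 2]), (1, [2]), (2, [0])], 2)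

def Spec_bfs (u : Int) (graph : List (Int × List Int)) (d_thr : Int) (out : List Int × Int) : Prop := out = bfs_alt u graph d_thr
instance (u : Int) (graph : List (Int × List Int)) (d_thr : Int) (out : List Int × Int) : Decidable (Spec_bfs u graph d_thr out) := by unfold Spec_bfs; infer_instance

-- ===== CLAIM (what is proved, stated in full; the proofs are below) =====
def Claim_equal_bfs : Prop := ∀ (u : Int) (graph : List (Int × List Int)) (d_thr : Int), Dom_bfs u graph d_thr → Pre_bfs u graph d_thr → Spec_bfs u graph d_thr (bfs u graph d_thr)

-- ===== LEMMAS AND PROOFS =====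

theorem bfsOuterB_cons (graph : List (Int × List Int)) (d_thr : Int) (a : Int) (l : List Int)
    (vis : PySem.Set Int) (level md : Int) :
    bfsOuterB graph d_thr (a :: l) vis level md =
      (match bfsInnerB graph d_thr level (a :: l) vis [] md with
       | .inl r => r
       | .inr (vis', next', md') => bfsOuterB graph d_thr next' vis' (level + 1) md') := by
  rcases h : bfsInnerB graph d_thr level (a :: l) vis [] md with r | ⟨vis', next', md'⟩ <;>
    rw [bfsOuterB] <;> split <;> simp_all

-- bridge: A's queue at any moment is the rest of B's current frontier at distance `level`
-- followed by B's next frontier at distance `level + 1`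
theorem bfs_bridge (graph : List (Int × List Int)) (d_thr : Int) :
    ∀ (n : Nat) (frontier next : List Int) (vis : PySem.Set Int) (level md : Int),
      pvUnvis graph vis * 3 + (frontier.length + next.length) * 2 + next.length ≤ n →
      bfsLoopA graph d_thr vis
          (frontier.map (fun v => (v, level)) ++ next.map (fun v => (v, level + 1))) md
        = (match bfsInnerB graph d_thr level frontier vis next md with
           | .inl r => r
           | .inr (vis', next', md') => bfsOuterB graph d_thr next' vis' (level + 1) md') := by
  intro n
  induction n with
  | zero =>
    intro frontier next vis level md hn
    have hf : frontier = [] := by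
      cases frontier with
      | nil => rfl
      | cons a l => simp only [List.length_cons] at hn; omega
    have hx : next = [] := by
      cases next with
      | nil => rfl
      | cons a l => simp only [List.length_cons] at hn; omega
    subst hf; subst hx
    simp [bfsLoopA, bfsInnerB, bfsOuterB]
  | succ n ih =>
    intro frontier next vis level md hn
    cases frontier with
    | nil =>
      simp only [List.map_nil, List.nil_append, bfsInnerB]
      cases next with
      | nil => simp [bfsLoopA, bfsOuterB]
      | cons a l =>
        rw [bfsOuterB_cons]
        have := ih (a :: l) [] vis (level + 1) md (by
          simp only [List.length_cons, List.length_nil] at hn ⊢; omega)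
        simpa using this
    | cons node rest =>
      simp only [List.map_cons, List.cons_append]
      rw [bfsLoopA, bfsInnerB]
      by_cases hv : PySem.Set.contains vis node = true
      · simp only [hv, if_true, dite_true]
        exact ih rest next vis level md (by simp only [List.length_cons] at hn; omega)
      · simp only [hv, if_false, Bool.false_eq_true, dite_false]
        by_cases hl : level < d_thr
        · simp only [hl, if_true]
          cases hg : (PySem.Dict.mk graph).get? node with
          | some ns =>
            have hmeas := pvUnvis_add graph vis node (by simpa using hv) ns hg
            have := ih rest (next ++ ns) (PySem.Set.add vis node) level (max md level) (by
              simp only [List.length_cons, List.length_append] at hn ⊢; omega)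
            rw [List.map_append, ← List.append_assoc] at this
            exact this
          | none => rfl
        · simp only [hl, if_false]
          have hmeas := pvUnvis_mono graph vis node
          exact ih rest next (PySem.Set.add vis node) level (max md level) (by
            simp only [List.length_cons] at hn; omega)

-- ===== VERDICT (by name: the statement is the Claim_ definition above) =====
theorem bfs_spec : Claim_equal_bfs := by
  intro u graph d_thr _ _
  unfold Spec_bfs bfs bfs_alt
  have h := bfs_bridge graph d_thr
      (pvUnvis graph PySem.Set.empty * 3 + 2 + 0) [u] [] PySem.Set.empty 0 0 (by simp)
  simp only [List.map_cons, List.map_nil, List.append_nil] at h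
  rw [h, ← bfsOuterB_cons]
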